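-- pv_equiv track=rewrite | github.com/rickyvu262/Programming-Projects | Stock- Buysell signal/class_indicator.py | execute
-- ===== SOURCE A (Python) =====
-- def execute(day_interval:int, close_price_list:list):
--     result_list=[]
--     movement_list=[0]
--     # movement_list list all the +1,1,0 when compare price with previous (Note:1st price on the movement is always 0)
--     for i in range(0,len(close_price_list)-1):
--         if close_price_list[i+1] > close_price_list[i]:
--             movement_list.append(1)
--         elif close_price_list[i+1] < close_price_list[i]:
--             movement_list.append(-1)
--         elif close_price_list[i+1] == close_price_list[i]:
--             movement_list.append(0)
--
--
--     total_movement=0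
--     for i in range (0,day_interval-1): # for index of list that is less than the day_interval, append it to the list first
--
--         total_movement = total_movement + (movement_list[i])# append the rest of the list based on the day-interval specify
--         result_list.append(total_movement)
--
--     for i in range(0,len(movement_list)-day_interval+1):
--         total_of_movement= sum(movement_list[i:day_interval+i])
--         result_list.append(total_of_movement)
--
--     return result_list
-- ===== SOURCE B (Python) =====
-- def execute(day_interval, close_price_list):
--     # B: prefix-sum (cumulative) formulation -- each window sum is a difference of
--     # two prefix sums, O(n) instead of re-summing every window.
--     movement = [0]
--     for prev, cur in zip(close_price_list, close_price_list[1:]):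
--         movement.append(1 if cur > prev else (-1 if cur < prev else 0))
--     prefix = [0]
--     for m in movement:
--         prefix.append(prefix[-1] + m)
--     head = prefix[1:day_interval]
--     tail = [prefix[i + day_interval] - prefix[i]
--             for i in range(len(movement) - day_interval + 1)]
--     return head + tail
-- ===== Notes on version B (the rewrite author's own statement) =====
-- stated objective: faster
-- what changed: B builds one prefix-sum list of the movement signs and emits each window sum as a difference of two prefix sums, instead of A's re-summing a fresh slice for every window.
-- outside the precondition, e.g. on execute(-1, [1, 2]): A returns [0, 0, 0, 0], B raises IndexError
import Mathlib
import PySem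

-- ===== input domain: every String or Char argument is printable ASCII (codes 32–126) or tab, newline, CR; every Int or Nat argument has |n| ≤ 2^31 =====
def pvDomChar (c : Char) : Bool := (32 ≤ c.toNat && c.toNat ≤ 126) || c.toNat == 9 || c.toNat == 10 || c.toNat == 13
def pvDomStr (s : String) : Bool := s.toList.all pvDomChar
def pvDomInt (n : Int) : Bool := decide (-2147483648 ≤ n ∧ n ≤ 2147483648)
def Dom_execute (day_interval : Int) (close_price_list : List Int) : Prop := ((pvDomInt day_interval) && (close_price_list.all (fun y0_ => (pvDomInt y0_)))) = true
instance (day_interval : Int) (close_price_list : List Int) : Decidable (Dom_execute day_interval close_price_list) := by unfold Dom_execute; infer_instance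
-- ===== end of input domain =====

-- B replaces A's per-window re-summation by a single prefix-sum pass (window sum = difference
-- of two prefix sums): O(n) instead of O(n·day_interval); return values proved equal on Pre_.

-- ===== PORT A =====
def execute (day_interval : Int) (close_price_list : List Int) : List Int :=
  let movement_list : List Int :=
    (PySem.List.pyRange 0 ((close_price_list.length : Int) - 1)).foldl
      (fun ml i =>
        let cur := PySem.List.pyGetD close_price_list (i + 1) 0
        let prev := PySem.List.pyGetD close_price_list i 0
        if cur > prev then ml ++ [1]
        else if cur < prev then ml ++ [-1]
        else if cur = prev then ml ++ [0]
        else ml) [0]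
  let st := (PySem.List.pyRange 0 (day_interval - 1)).foldl
      (fun (st : Int × List Int) i =>
        let t := st.1 + PySem.List.pyGetD movement_list i 0
        (t, st.2 ++ [t])) (0, ([] : List Int))
  let result_list :=
    (PySem.List.pyRange 0 ((movement_list.length : Int) - day_interval + 1)).foldl
      (fun res i =>
        res ++ [(PySem.List.slice movement_list (some i) (some (day_interval + i))).sum]) st.2
  result_list

-- ===== PORT B =====
def execute_alt (day_interval : Int) (close_price_list : List Int) : List Int :=
  let movement : List Int :=
    (close_price_list.zip (PySem.List.slice close_price_list (some 1) none)).foldl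
      (fun ml pc =>
        ml ++ [if pc.2 > pc.1 then 1 else if pc.2 < pc.1 then -1 else 0]) [0]
  let pfx : List Int :=
    movement.foldl (fun p m => p ++ [PySem.List.pyGetD p (-1) 0 + m]) [0]
  let head := PySem.List.slice pfx (some 1) (some day_interval)
  let tail := (PySem.List.pyRange 0 ((movement.length : Int) - day_interval + 1)).map
      (fun i => PySem.List.pyGetD pfx (i + day_interval) 0 - PySem.List.pyGetD pfx i 0)
  head ++ tail

-- ===== PRECONDITION & SPEC =====
-- Pre_ restricts to the natural domain: day_interval ≥ 0 (on a negative window size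
-- A's zero-filled output is an accident of empty slices and B's prefix-difference
-- indexing fails) and day_interval ≤ len(movement_list)+1 (beyond that A raises
-- IndexError in its first loop).
def Pre_execute (day_interval : Int) (close_price_list : List Int) : Prop :=
  0 ≤ day_interval ∧ day_interval ≤ ((max close_price_list.length 1 : Nat) : Int) + 1
instance (day_interval : Int) (close_price_list : List Int) : Decidable (Pre_execute day_interval close_price_list) := by unfold Pre_execute; infer_instance
def pvWitness_execute : Int × List Int := (2, [5, 6, 6, 4, 7])

def Spec_execute (day_interval : Int) (close_price_list : List Int) (out : List Int) : Prop := out = execute_alt day_interval close_price_list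
instance (day_interval : Int) (close_price_list : List Int) (out : List Int) : Decidable (Spec_execute day_interval close_price_list out) := by unfold Spec_execute; infer_instance

-- ===== CLAIM (what is proved, stated in full; the proofs are below) =====
def Claim_equal_execute : Prop := ∀ (day_interval : Int) (close_price_list : List Int), Dom_execute day_interval close_price_list → Pre_execute day_interval close_price_list → Spec_execute day_interval close_price_list (execute day_interval close_price_list)

-- ===== LEMMAS AND PROOFS =====
def stepv (p c : Int) : Int := if c > p then 1 else if c < p then -1 else 0
def movOf (xs : List Int) : List Int := 0 :: (xs.zip xs.tail).map (fun pc => stepv pc.1 pc.2)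

theorem movOf_length (xs : List Int) : (movOf xs).length = max xs.length 1 := by
  simp [movOf, List.length_zip]
  cases xs <;> simp

theorem movB_eq (xs : List Int) :
    (xs.zip (PySem.List.slice xs (some 1) none)).foldl
      (fun ml pc =>
        ml ++ [if pc.2 > pc.1 then 1 else if pc.2 < pc.1 then -1 else 0]) [0] = movOf xs := by
  rw [PySem.List.foldl_append_singleton_eq_map]
  simp [movOf, PySem.List.slice_from, stepv]

theorem pyGetD_neg_one_last (acc : List Int) (x : Int) :
    PySem.List.pyGetD (acc ++ [x]) (-1) 0 = x := by
  simp [PySem.List.pyGetD, PySem.List.pyGet?, PySem.List.pyIdx?]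

theorem prefix_aux (l : List Int) (acc : List Int) (s : Int)
    (hs : PySem.List.pyGetD acc (-1) 0 = s) :
    l.foldl (fun p m => p ++ [PySem.List.pyGetD p (-1) 0 + m]) acc
      = acc ++ (List.range l.length).map (fun k => s + (l.take (k + 1)).sum) := by
  induction l generalizing acc s with
  | nil => simp
  | cons m t ih =>
    simp only [List.foldl_cons, hs]
    rw [ih (acc ++ [s + m]) (s + m) (pyGetD_neg_one_last acc (s+m))]
    rw [List.append_assoc]
    congr 1
    simp [List.length_cons, List.range_succ_eq_map, List.map_map, Function.comp]
    intro a _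
    ring

theorem prefix_eq (l : List Int) :
    l.foldl (fun p m => p ++ [PySem.List.pyGetD p (-1) 0 + m]) [0]
      = 0 :: (List.range l.length).map (fun k => ((l.take (k + 1)).sum)) := by
  rw [prefix_aux l [0] 0 (by decide)]
  simp
theorem part1_eq (mov : List Int) (e : Nat) (he : e ≤ mov.length) :
    ((List.range e).foldl
      (fun (st : Int × List Int) (k : Nat) =>
        let t := st.1 + PySem.List.pyGetD mov (k : Int) 0
        (t, st.2 ++ [t])) (0, ([] : List Int)))
      = ((mov.take e).sum, (List.range e).map (fun k => (mov.take (k + 1)).sum)) := by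
  induction e with
  | zero => simp
  | succ n ih =>
    rw [List.range_succ, List.foldl_append, ih (by omega)]
    have hn : n < mov.length := by omega
    have hget : PySem.List.pyGetD mov (n : Int) 0 = mov[n] := by
      rw [PySem.List.pyGetD_natCast]; simp [List.getD_eq_getElem?_getD, List.getElem?_eq_getElem hn]
    have hsum : (mov.take (n + 1)).sum = (mov.take n).sum + mov[n] := by
      rw [List.take_add_one]
      simp [hn]
    simp only [List.foldl_cons, List.foldl_nil, hget, hsum, List.map_append, List.map_cons, List.map_nil]

theorem range_map_eq_zip (g : Int → Int → Int) (xs : List Int) :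
    (List.range (xs.length - 1)).map (fun k => g (xs.getD k 0) (xs.getD (k+1) 0))
      = (xs.zip xs.tail).map (fun pc => g pc.1 pc.2) := by
  apply List.ext_getElem
  · simp
  · intro i h1 h2
    simp only [List.length_map, List.length_range] at h1
    have hi : i < xs.length := by omega
    have hi1 : i + 1 < xs.length := by omega
    have hit : i < xs.tail.length := by simp [List.length_tail]; omega
    simp [List.getElem_zip, List.getElem_tail, List.getD_eq_getElem?_getD,
      hi, hi1]

theorem movA_eq (xs : List Int) :
    (PySem.List.pyRange 0 ((xs.length : Int) - 1)).foldl
      (fun ml i =>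
        let cur := PySem.List.pyGetD xs (i + 1) 0
        let prev := PySem.List.pyGetD xs i 0
        if cur > prev then ml ++ [1]
        else if cur < prev then ml ++ [-1]
        else if cur = prev then ml ++ [0]
        else ml) [0] = movOf xs := by
  have hbody : (fun (ml : List Int) (i : Int) =>
        let cur := PySem.List.pyGetD xs (i + 1) 0
        let prev := PySem.List.pyGetD xs i 0
        if cur > prev then ml ++ [1]
        else if cur < prev then ml ++ [-1]
        else if cur = prev then ml ++ [0]
        else ml)
      = (fun ml i => ml ++ [stepv (PySem.List.pyGetD xs i 0) (PySem.List.pyGetD xs (i + 1) 0)]) := by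
    funext ml i
    simp only [stepv]
    split_ifs <;> first | rfl | omega
  rw [hbody]
  cases xs with
  | nil => decide
  | cons a t =>
    have hlen : ((a :: t).length : Int) - 1 = ((t.length : Nat) : Int) := by
      simp
    rw [hlen, PySem.List.pyRange_zero_natCast, List.foldl_map,
      PySem.List.foldl_append_singleton_eq_map]
    have hT : t.length = (a :: t).length - 1 := by simp
    show ([0] : List Int) ++ _ = movOf (a :: t)
    unfold movOf
    rw [hT]
    have := range_map_eq_zip (fun p c => stepv p c) (a :: t)
    rw [← this, List.singleton_append]
    congr 1
    apply List.map_congr_left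
    intro k hk
    have h1 : PySem.List.pyGetD (a :: t) ((k : Int)) 0 = (a :: t).getD k 0 :=
      PySem.List.pyGetD_natCast _ _ _
    have h2 : PySem.List.pyGetD (a :: t) ((k : Int) + 1) 0 = (a :: t).getD (k + 1) 0 := by
      have : ((k : Int) + 1) = ((k + 1 : Nat) : Int) := by push_cast; ring
      rw [this, PySem.List.pyGetD_natCast]
    rw [h1, h2]

theorem getP (mov : List Int) (j : Nat) (hj : j ≤ mov.length) :
    PySem.List.pyGetD (0 :: (List.range mov.length).map (fun k => (mov.take (k + 1)).sum)) ((j : Nat) : Int) 0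
      = (mov.take j).sum := by
  rw [PySem.List.pyGetD_natCast]
  cases j with
  | zero => simp
  | succ s =>
    have hs : s < mov.length := by omega
    simp [List.getD_eq_getElem?_getD, hs]

theorem sum_slice (mov : List Int) (k dt : Nat) (_h : k + dt ≤ mov.length) :
    ((mov.drop k).take dt).sum = (mov.take (k + dt)).sum - (mov.take k).sum := by
  rw [List.take_drop]
  have h2 := List.sum_take_add_sum_drop (mov.take (k + dt)) k
  have h3 : (mov.take (k + dt)).take k = mov.take k := by
    rw [List.take_take]; congr 1; omega
  rw [h3] at h2
  linarith

theorem core (d : Int) (mov : List Int)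
    (h1 : 1 ≤ d) (h2' : d ≤ (mov.length : Int) + 1) :
    (PySem.List.pyRange 0 ((mov.length : Int) - d + 1)).foldl
      (fun res i => res ++ [(PySem.List.slice mov (some i) (some (d + i))).sum])
      ((PySem.List.pyRange 0 (d - 1)).foldl
        (fun (st : Int × List Int) i =>
          let t := st.1 + PySem.List.pyGetD mov i 0
          (t, st.2 ++ [t])) (0, ([] : List Int))).2
    = PySem.List.slice (0 :: (List.range mov.length).map (fun k => ((mov.take (k + 1)).sum)))
        (some 1) (some d)
      ++ (PySem.List.pyRange 0 ((mov.length : Int) - d + 1)).map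
          (fun i => PySem.List.pyGetD (0 :: (List.range mov.length).map (fun k => ((mov.take (k + 1)).sum))) (i + d) 0
                  - PySem.List.pyGetD (0 :: (List.range mov.length).map (fun k => ((mov.take (k + 1)).sum))) i 0) := by
  have hde : d - 1 = (((d - 1).toNat : Nat) : Int) := by omega
  have hen : (d - 1).toNat ≤ mov.length := by omega
  rw [hde, PySem.List.pyRange_zero_natCast, List.foldl_map, part1_eq mov (d - 1).toNat hen]
  have hw : (mov.length : Int) - d + 1 = (((mov.length + 1 - d.toNat : Nat) : Nat) : Int) := by omega
  rw [hw, PySem.List.pyRange_zero_natCast, List.foldl_map, List.map_map,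
    PySem.List.foldl_append_singleton_eq_map]
  congr 1
  · have hd' : (d : Int) = ((d.toNat : Nat) : Int) := by omega
    have h1' : (1 : Int) = ((1 : Nat) : Int) := rfl
    rw [hd', h1', PySem.List.slice_natCast]
    simp only [List.drop_succ_cons, List.drop_zero]
    rw [← List.map_take, List.take_range]
    congr 2
    omega
  · apply List.map_congr_left
    intro k hk
    simp only [List.mem_range] at hk
    have hkd : k + d.toNat ≤ mov.length := by omega
    have hsl : PySem.List.slice mov (some ((k : Nat) : Int)) (some (d + (k : Nat))) =
        (mov.drop k).take d.toNat := by
      have hc : d + ((k : Nat) : Int) = (((d.toNat + k : Nat) : Nat) : Int) := by omega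
      rw [hc, PySem.List.slice_natCast]
      congr 1
      omega
    have hg1 : ((k : Nat) : Int) + d = (((k + d.toNat : Nat) : Nat) : Int) := by omega
    simp only [Function.comp]
    rw [hsl, sum_slice mov k d.toNat hkd, hg1, getP mov (k + d.toNat) hkd,
      getP mov k (by omega)]

theorem core_zero (mov : List Int) :
    (PySem.List.pyRange 0 ((mov.length : Int) - 0 + 1)).foldl
      (fun res i => res ++ [(PySem.List.slice mov (some i) (some (0 + i))).sum])
      ((PySem.List.pyRange 0 ((0 : Int) - 1)).foldl
        (fun (st : Int × List Int) i =>
          let t := st.1 + PySem.List.pyGetD mov i 0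
          (t, st.2 ++ [t])) (0, ([] : List Int))).2
    = PySem.List.slice (0 :: (List.range mov.length).map (fun k => ((mov.take (k + 1)).sum)))
        (some 1) (some 0)
      ++ (PySem.List.pyRange 0 ((mov.length : Int) - 0 + 1)).map
          (fun i => PySem.List.pyGetD (0 :: (List.range mov.length).map (fun k => ((mov.take (k + 1)).sum))) (i + 0) 0
                  - PySem.List.pyGetD (0 :: (List.range mov.length).map (fun k => ((mov.take (k + 1)).sum))) i 0) := by
  have hempty : PySem.List.pyRange 0 ((0 : Int) - 1) = [] := by decide
  have hsl0 : PySem.List.slice (0 :: (List.range mov.length).map (fun k => ((mov.take (k + 1)).sum)))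
      (some 1) (some 0) = [] := by
    have h1 : (1 : Int) = ((1 : Nat) : Int) := rfl
    have h0 : (0 : Int) = ((0 : Nat) : Int) := rfl
    rw [h1, h0, PySem.List.slice_natCast]
    simp
  rw [hempty, hsl0, List.foldl_nil, PySem.List.foldl_append_singleton_eq_map]
  simp only [List.nil_append]
  apply List.map_congr_left
  intro i hi
  have h0i : 0 ≤ i := by
    rcases PySem.List.mem_pyRange_one.mp hi with ⟨h, _⟩
    exact h
  have hslice : PySem.List.slice mov (some i) (some (0 + i)) = [] := by
    have h2 : (0 : Int) + i = ((i.toNat : Nat) : Int) := by omega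
    have hi' : i = ((i.toNat : Nat) : Int) := by omega
    rw [h2, hi', PySem.List.slice_natCast]
    simp
  rw [hslice]
  simp

theorem execute_eq_alt (d : Int) (xs : List Int)
    (h1 : 0 ≤ d) (h2 : d ≤ ((max xs.length 1 : Nat) : Int) + 1) :
    execute d xs = execute_alt d xs := by
  have h2' : d ≤ ((movOf xs).length : Int) + 1 := by rw [movOf_length]; exact h2
  simp only [execute, execute_alt]
  rw [movA_eq, movB_eq, prefix_eq]
  rcases eq_or_lt_of_le h1 with hz | hpos
  · subst hz
    exact core_zero (movOf xs)
  · exact core d (movOf xs) hpos h2'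

-- ===== VERDICT (by name: the statement is the Claim_ definition above) =====
theorem execute_spec : Claim_equal_execute := by
  intro d xs _ hpre
  exact execute_eq_alt d xs hpre.1 hpre.2
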